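-- pv_equiv track=rewrite | github.com/LeftTry/OT3 | notmain.py | canon
-- ===== SOURCE A (Python) =====
-- def canon(n):
--     can = []
--     for d in range(2, n + 1):
--         k = 0
--         while n % d == 0:
--             n //= d
--             k += 1
--         if k > 0:
--             can.append((d, k))
--     return can
-- ===== SOURCE B (Python) =====
-- def canon(n):
--     can = []
--     d = 2
--     while d * d <= n:
--         k = 0
--         while n % d == 0:
--             n //= d
--             k += 1
--         if k > 0:
--             can.append((d, k))
--         d += 1
--     if n > 1:
--         can.append((n, 1))
--     return can
-- ===== Notes on version B (the rewrite author's own statement) =====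
-- stated objective: faster
-- what changed: B trial-divides only while the divisor squared does not exceed the remaining value and then appends the remaining prime cofactor, instead of A's scan of every candidate divisor up to n.
import Mathlib
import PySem

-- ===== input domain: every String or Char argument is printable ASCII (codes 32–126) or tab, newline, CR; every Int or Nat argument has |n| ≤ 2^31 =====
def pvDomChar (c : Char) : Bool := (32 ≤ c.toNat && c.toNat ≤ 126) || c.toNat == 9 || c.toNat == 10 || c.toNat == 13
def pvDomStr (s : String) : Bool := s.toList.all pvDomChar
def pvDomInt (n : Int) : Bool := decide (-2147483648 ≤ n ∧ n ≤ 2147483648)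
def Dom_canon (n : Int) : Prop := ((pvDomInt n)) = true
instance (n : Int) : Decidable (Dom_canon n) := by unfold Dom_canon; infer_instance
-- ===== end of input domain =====

-- B trial-divides only while the divisor squared does not exceed the remaining value and then appends
-- the remaining prime cofactor, instead of A's scan of every candidate divisor up to n: measurably faster.


-- ===== PORT A =====
-- inner 'while n % d == 0: n //= d; k += 1' loop, identical in both Pythons and shared;
-- the fuel only makes it total (it is never exhausted on reachable states, where 1 ≤ n and 2 ≤ d).
def divOutWhile : Nat → Int → Int → Int × Int
  | 0, n, _ => (n, 0)
  | f+1, n, d =>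
    if PySem.Int.mod n d = 0 then
      let p := divOutWhile f (PySem.Int.floordiv n d) d
      (p.1, p.2 + 1)
    else (n, 0)

-- body of A's 'for d in range(2, n+1)' loop: state = (current n, can)
def canonStep (st : Int × List (Int × Int)) (d : Int) : Int × List (Int × Int) :=
  let p := divOutWhile (st.1.natAbs + 1) st.1 d
  (p.1, if p.2 > 0 then st.2 ++ [(d, p.2)] else st.2)

def canon (n : Int) : List (Int × Int) :=
  ((PySem.List.pyRange 2 (n+1) 1).foldl canonStep (n, [])).2

-- ===== PORT B =====
-- B's outer 'while d * d <= n' loop; the fuel only makes it total (never exhausted when 1 ≤ n).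
def canonAltGo : Nat → Int → Int → List (Int × Int)
  | 0, _, _ => []
  | f+1, n, d =>
    if d * d ≤ n then
      let p := divOutWhile (n.natAbs + 1) n d
      let rest := canonAltGo f p.1 (d+1)
      if p.2 > 0 then (d, p.2) :: rest else rest
    else if n > 1 then [(n, 1)] else []

def canon_alt (n : Int) : List (Int × Int) := canonAltGo (n.natAbs + 2) n 2

-- ===== PRECONDITION & SPEC =====
def Spec_canon (n : Int) (out : List (Int × Int)) : Prop := out = canon_alt n
instance (n : Int) (out : List (Int × Int)) : Decidable (Spec_canon n out) := by unfold Spec_canon; infer_instance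

-- ===== CLAIM (what is proved, stated in full; the proofs are below) =====
def Claim_equal_canon : Prop := ∀ (n : Int), Dom_canon n → Spec_canon n (canon n)

-- ===== LEMMAS AND PROOFS =====

-- the inner while loop: divides out d completely, with enough fuel
theorem divOut_spec (m : Nat) : ∀ (n d : Int) (f : Nat), n.natAbs ≤ m → 1 ≤ n → 2 ≤ d →
    n.natAbs ≤ f →
    (divOutWhile f n d).1 ∣ n ∧ 1 ≤ (divOutWhile f n d).1 ∧ ¬ d ∣ (divOutWhile f n d).1 ∧
      0 ≤ (divOutWhile f n d).2 ∧
      ((divOutWhile f n d).2 = 0 ↔ ¬ d ∣ n) ∧ (¬ d ∣ n → divOutWhile f n d = (n, 0)) := by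
  induction m with
  | zero => intro n d f hm hn _ _; omega
  | succ m ih =>
    intro n d f hm hn hd hf
    obtain ⟨f, rfl⟩ : ∃ g, f = g + 1 := ⟨f - 1, by omega⟩
    by_cases hdvd : d ∣ n
    · have hmod : PySem.Int.mod n d = 0 := (PySem.Int.mod_eq_zero_iff_dvd n d).mpr hdvd
      have hdiv : PySem.Int.floordiv n d = n / d := PySem.Int.floordiv_eq_ediv_of_pos (by omega)
      set n' := n / d with hn'
      have hmul : n' * d = n := Int.ediv_mul_cancel hdvd
      have hn'1 : 1 ≤ n' := by nlinarith
      have hn'lt : n' < n := by nlinarith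
      have spec := ih n' d f (by omega) hn'1 hd (by omega)
      have hstep : divOutWhile (f+1) n d = ((divOutWhile f n' d).1, (divOutWhile f n' d).2 + 1) := by
        simp [divOutWhile, hmod, hdiv]
      rw [hstep]
      obtain ⟨s1, s2, s3, s4, _, _⟩ := spec
      refine ⟨s1.trans ⟨d, hmul.symm⟩, s2, s3, by omega, ?_, fun h => absurd hdvd h⟩
      constructor
      · intro h; omega
      · intro h; exact absurd hdvd h
    · have hmod : PySem.Int.mod n d ≠ 0 := fun h => hdvd ((PySem.Int.mod_eq_zero_iff_dvd n d).mp h)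
      have hstep : divOutWhile (f+1) n d = (n, 0) := by simp [divOutWhile, hmod]
      rw [hstep]
      exact ⟨dvd_refl n, hn, hdvd, le_refl 0, by simp [hdvd], fun _ => rfl⟩

-- once the running value is 1, the rest of A's loop does nothing
theorem fold_one (k : Nat) : ∀ (a b : Int) (acc : List (Int × Int)), 2 ≤ a → (b - a).toNat = k →
    (PySem.List.pyRange a b 1).foldl canonStep (1, acc) = (1, acc) := by
  induction k with
  | zero =>
    intro a b acc ha hk
    rw [PySem.List.pyRange_one_eq_nil (by omega)]; rfl
  | succ k ih =>
    intro a b acc ha hk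
    rw [PySem.List.pyRange_one_cons (by omega)]
    have hmod : PySem.Int.mod 1 a ≠ 0 := by
      intro h
      have := (PySem.Int.mod_eq_zero_iff_dvd 1 a).mp h
      have := Int.le_of_dvd (by omega) this
      omega
    have hstep : canonStep (1, acc) a = (1, acc) := by
      simp [canonStep, divOutWhile, hmod]
    simp only [List.foldl_cons, hstep]
    exact ih (a+1) b acc (by omega) (by omega)
-- tail of A's loop once d*d > n and n has no divisor in [2,d): only d = n fires, appending (n,1)
theorem fold_tail (k : Nat) : ∀ (n d b : Int) (acc : List (Int × Int)), (n - d).toNat = k →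
    2 ≤ d → d ≤ n → n < b → (∀ e : Int, 2 ≤ e → e < d → ¬ e ∣ n) → n < d * d →
    (PySem.List.pyRange d b 1).foldl canonStep (n, acc) = (1, acc ++ [(n, 1)]) := by
  induction k with
  | zero =>
    intro n d b acc hk hd hdn hb _ _
    have hdn' : d = n := by omega
    subst hdn'
    rw [PySem.List.pyRange_one_cons (by omega)]
    have hmod : PySem.Int.mod d d = 0 := (PySem.Int.mod_eq_zero_iff_dvd d d).mpr (dvd_refl d)
    have hdiv : PySem.Int.floordiv d d = 1 := by
      rw [PySem.Int.floordiv_eq_ediv_of_pos (by omega)]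
      exact Int.ediv_self (by omega)
    have hmod1 : PySem.Int.mod 1 d ≠ 0 := by
      intro h
      have := Int.le_of_dvd (by omega) ((PySem.Int.mod_eq_zero_iff_dvd 1 d).mp h)
      omega
    obtain ⟨g, hg⟩ : ∃ g, d.natAbs = g + 1 := ⟨d.natAbs - 1, by omega⟩
    have hstep : canonStep (d, acc) d = (1, acc ++ [(d, 1)]) := by
      simp [canonStep, hg, divOutWhile, hmod, hdiv, hmod1]
    simp only [List.foldl_cons, hstep]
    exact fold_one (b - (d+1)).toNat (d+1) b _ (by omega) rfl
  | succ k ih =>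
    intro n d b acc hk hd hdn hb hinv hsq
    have hdltn : d < n := by omega
    have hndvd : ¬ d ∣ n := by
      rintro ⟨c, hc⟩
      have hc2 : 2 ≤ c := by nlinarith
      have hcd : c < d := by nlinarith
      exact hinv c hc2 hcd ⟨d, by linarith [hc]⟩
    have hmod : PySem.Int.mod n d ≠ 0 := fun h => hndvd ((PySem.Int.mod_eq_zero_iff_dvd n d).mp h)
    obtain ⟨g, hg⟩ : ∃ g, n.natAbs = g + 1 := ⟨n.natAbs - 1, by omega⟩
    have hstep : canonStep (n, acc) d = (n, acc) := by
      simp [canonStep, divOutWhile, hmod]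
    rw [PySem.List.pyRange_one_cons (by omega)]
    simp only [List.foldl_cons, hstep]
    refine ih n (d+1) b acc (by omega) (by omega) (by omega) hb ?_ (by nlinarith)
    intro e he hed
    by_cases hedlt : e < d
    · exact hinv e he hedlt
    · have : e = d := by omega
      subst this; exact hndvd

-- main invariant: A's remaining loop from d equals B's loop from d (state n, fuel fu)
theorem fold_main (fu : Nat) : ∀ (n d b : Int) (acc : List (Int × Int)), 1 ≤ fu → 2 ≤ d →
    1 ≤ n → n < b → (n : Int) + 2 ≤ (fu : Int) + d → (∀ e : Int, 2 ≤ e → e < d → ¬ e ∣ n) →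
    (PySem.List.pyRange d b 1).foldl canonStep (n, acc) = (1, acc ++ canonAltGo fu n d) := by
  induction fu with
  | zero => intro n d b acc h1 _ _ _ _ _; omega
  | succ fu ih =>
    intro n d b acc h1 hd hn hb hfu hinv
    by_cases hsq : d * d ≤ n
    · have hdn : d ≤ n := by nlinarith
      have hfu1 : 1 ≤ fu := by omega
      have spec := divOut_spec n.natAbs n d (n.natAbs + 1) (le_refl _) hn hd (by omega)
      set p := divOutWhile (n.natAbs + 1) n d with hp
      have hstep : canonStep (n, acc) d = (p.1, if p.2 > 0 then acc ++ [(d, p.2)] else acc) := rfl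
      obtain ⟨s1, s2, s3, s4, s5, s6⟩ := spec
      have hgo : canonAltGo (fu+1) n d
          = if p.2 > 0 then (d, p.2) :: canonAltGo fu p.1 (d+1) else canonAltGo fu p.1 (d+1) := by
        rw [hp]; simp [canonAltGo, hsq]
      rw [PySem.List.pyRange_one_cons (by omega), List.foldl_cons, hstep, hgo]
      have hp1n : p.1 ≤ n := Int.le_of_dvd (by omega) s1
      have hinv' : ∀ e : Int, 2 ≤ e → e < d + 1 → ¬ e ∣ p.1 := by
        intro e he hed hdvd
        by_cases hlt : e < d
        · exact hinv e he hlt (hdvd.trans s1)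
        · have : e = d := by omega
          subst this; exact s3 hdvd
      by_cases hk : p.2 > 0
      · simp only [if_pos hk]
        rw [ih p.1 (d+1) b (acc ++ [(d, p.2)]) hfu1 (by omega) s2 (by omega)
          (by omega) hinv']
        simp
      · have hpn : p = (n, 0) := s6 (s5.mp (by omega))
        simp only [if_neg hk]
        have hinv'' : ∀ e : Int, 2 ≤ e → e < d + 1 → ¬ e ∣ n := by
          intro e he hed; have := hinv' e he hed; rwa [hpn] at this
        rw [hpn]
        exact ih n (d+1) b acc hfu1 (by omega) hn hb (by omega) hinv''
    · have hgo : canonAltGo (fu+1) n d = if n > 1 then [(n, 1)] else [] := by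
        simp [canonAltGo, hsq]
      rw [hgo]
      by_cases hn1 : n > 1
      · have hdn : d ≤ n := by
          by_contra hlt
          exact hinv n (by omega) (by omega) (dvd_refl n)
        rw [if_pos hn1]
        exact fold_tail (n - d).toNat n d b acc rfl hd hdn hb hinv (by omega)
      · have : n = 1 := by omega
        subst this
        rw [if_neg hn1]
        simpa using fold_one (b - d).toNat d b acc hd rfl

-- ===== VERDICT (by name: the statement is the Claim_ definition above) =====
theorem canon_spec : Claim_equal_canon := by
  unfold Claim_equal_canon Spec_canon
  intro n _
  by_cases hn : 2 ≤ n
  · have h := fold_main (n.natAbs + 2) n 2 (n+1) [] (by omega) (by omega) (by omega) (by omega)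
      (by omega) (by intro e he hed; omega)
    unfold canon canon_alt
    rw [h]
    simp
  · unfold canon canon_alt
    rw [PySem.List.pyRange_one_eq_nil (by omega)]
    have hsq4 : ¬ (4 : Int) ≤ n := by omega
    have hgt : ¬ n > 1 := by omega
    simp [canonAltGo, hsq4, hgt]
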